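-- pv_equiv track=rewrite | github.com/shibam120302/LeetCode | Fraction pairs with sum 1 - GFG/fraction-pairs-with-sum-1.py | countFractions
-- ===== SOURCE A (Python) =====
-- from math import gcd
-- from collections import defaultdict
--
-- def countFractions(n, numerator, denominator):
--     fractionCount = defaultdict(int)
--     ans = 0
--
--     for i in range(n):
--         x = numerator[i]
--         y = denominator[i]
--         gcd_val = gcd(x, y)
--         x //= gcd_val
--         y //= gcd_val
--         want_x = y - x
--         want_y = y
--
--         if (want_x, want_y) in fractionCount:
--             ans += fractionCount[(want_x, want_y)]
--
--         fractionCount[(x, y)] += 1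
--
--     return ans
-- ===== SOURCE B (Python) =====
-- from math import gcd
-- from collections import Counter
--
-- def countFractions(n, numerator, denominator):
--     cnt = Counter()
--     for i in range(n):
--         x = numerator[i]
--         y = denominator[i]
--         g = gcd(x, y)
--         cnt[(x // g, y // g)] += 1
--     total = 0
--     for (x, y), c in cnt.items():
--         comp = (y - x, y)
--         if comp == (x, y):
--             total += c * (c - 1)
--         else:
--             total += c * cnt[comp]
--     return total // 2
-- ===== Notes on version B (the rewrite author's own statement) =====
-- stated objective: alternative
-- what changed: Replaces A's single interleaved pass (look up each fraction's complement among earlier entries while growing a defaultdict) with two phases: first build a Counter of all reduced fractions, then sum c*cnt[complement] over distinct keys (c*(c-1) for self-complementary keys) and halve the ordered-pair total.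
import Mathlib
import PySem

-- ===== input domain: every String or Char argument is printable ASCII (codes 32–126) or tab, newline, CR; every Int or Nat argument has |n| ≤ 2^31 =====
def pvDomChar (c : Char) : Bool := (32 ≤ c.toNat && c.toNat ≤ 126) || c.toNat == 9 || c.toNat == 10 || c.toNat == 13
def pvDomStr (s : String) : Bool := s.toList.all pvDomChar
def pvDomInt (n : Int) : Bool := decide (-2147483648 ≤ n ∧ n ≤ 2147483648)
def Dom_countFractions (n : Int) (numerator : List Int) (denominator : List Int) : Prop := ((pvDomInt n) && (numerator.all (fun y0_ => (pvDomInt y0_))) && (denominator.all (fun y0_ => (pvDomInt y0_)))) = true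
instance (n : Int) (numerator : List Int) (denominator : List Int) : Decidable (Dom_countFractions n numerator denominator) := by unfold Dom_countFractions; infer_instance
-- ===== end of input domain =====

-- B builds a Counter of reduced fractions first, then counts complement pairs over distinct keys and halves the ordered total; an alternative two-phase algorithm (no speed claim).


-- ===== PORT A =====
def countFractions (n : Int) (numerator : List Int) (denominator : List Int) : Int :=
  ((PySem.List.pyRange 0 n 1).foldl
    (fun (st : PySem.Dict (Int × Int) Int × Int) i =>
      match PySem.List.pyGet? numerator i, PySem.List.pyGet? denominator i with
      | some x0, some y0 =>
        let g : Int := Int.gcd x0 y0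
        let x := PySem.Int.floordiv x0 g
        let y := PySem.Int.floordiv y0 g
        let wantX := y - x
        let wantY := y
        let ans := if st.1.contains (wantX, wantY) then st.2 + st.1.getD (wantX, wantY) 0 else st.2
        (st.1.insert (x, y) (st.1.getD (x, y) 0 + 1), ans)
      | _, _ => st)
    (PySem.Dict.empty, 0)).2

-- ===== PORT B =====
def countFractions_alt (n : Int) (numerator : List Int) (denominator : List Int) : Int :=
  let cnt : PySem.Dict (Int × Int) Int :=
    (PySem.List.pyRange 0 n 1).foldl
      (fun d i =>
        match PySem.List.pyGet? numerator i with
        | none => d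
        | some x0 =>
          match PySem.List.pyGet? denominator i with
          | none => d
          | some y0 =>
            let g : Int := Int.gcd x0 y0
            let p := (PySem.Int.floordiv x0 g, PySem.Int.floordiv y0 g)
            d.insert p (d.getD p 0 + 1))
      PySem.Dict.empty
  let total :=
    cnt.items.foldl
      (fun t kc =>
        if (kc.1.2 - kc.1.1, kc.1.2) = kc.1 then t + kc.2 * (kc.2 - 1)
        else t + kc.2 * cnt.getD (kc.1.2 - kc.1.1, kc.1.2) 0)
      0
  PySem.Int.floordiv total 2

-- ===== PRECONDITION & SPEC =====
-- Pre_ excludes exactly the inputs where the Python A raises: n exceeding a list's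
-- length (IndexError) and an index below n whose numerator and denominator are both 0
-- (gcd is 0, so the reduction raises ZeroDivisionError); B raises on the same inputs.
def Pre_countFractions (n : Int) (numerator : List Int) (denominator : List Int) : Prop :=
  n ≤ numerator.length ∧ n ≤ denominator.length ∧
  ∀ i < n.toNat, ¬ (numerator.getD i 0 = 0 ∧ denominator.getD i 0 = 0)
instance (n : Int) (numerator : List Int) (denominator : List Int) : Decidable (Pre_countFractions n numerator denominator) := by unfold Pre_countFractions; infer_instance

def pvWitness_countFractions : Int × List Int × List Int := (3, ([1, 1, 2], [2, 3, 4]))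

def Spec_countFractions (n : Int) (numerator : List Int) (denominator : List Int) (out : Int) : Prop := out = countFractions_alt n numerator denominator
instance (n : Int) (numerator : List Int) (denominator : List Int) (out : Int) : Decidable (Spec_countFractions n numerator denominator out) := by unfold Spec_countFractions; infer_instance

-- ===== CLAIM (what is proved, stated in full; the proofs are below) =====
def Claim_equal_countFractions : Prop := ∀ (n : Int) (numerator : List Int) (denominator : List Int), Dom_countFractions n numerator denominator → Pre_countFractions n numerator denominator → Spec_countFractions n numerator denominator (countFractions n numerator denominator)

-- ===== LEMMAS AND PROOFS =====

-- complement of a reduced fraction: (x, y) ↦ (y - x, y)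
def pvComp (p : Int × Int) : Int × Int := (p.2 - p.1, p.2)

-- reduction by gcd, as both ports compute it
def pvRed (x y : Int) : Int × Int :=
  (PySem.Int.floordiv x (Int.gcd x y), PySem.Int.floordiv y (Int.gcd x y))

-- the list of reduced fractions both ports traverse
def pvReds (n : Int) (numerator denominator : List Int) : List (Int × Int) :=
  (PySem.List.pyRange 0 n 1).map
    (fun i => pvRed (PySem.List.pyGetD numerator i 0) (PySem.List.pyGetD denominator i 0))

-- unordered pair count: pairs i < j with red_i equal to the complement of red_j
def pvPairsB : List (Int × Int) → Nat
  | [] => 0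
  | p :: rest => rest.countP (fun q => pvComp q == p) + pvPairsB rest

-- A's loop step, expressed on the reduced pair
def pvStepA (st : PySem.Dict (Int × Int) Int × Int) (p : Int × Int) :
    PySem.Dict (Int × Int) Int × Int :=
  (st.1.insert p (st.1.getD p 0 + 1),
   if st.1.contains (pvComp p) then st.2 + st.1.getD (pvComp p) 0 else st.2)

theorem pvComp_invol (p : Int × Int) : pvComp (pvComp p) = p := by
  simp [pvComp]

theorem pv_sum_map_add {α : Type} (l : List α) (f g : α → Nat) :
    (l.map (fun x => f x + g x)).sum = (l.map f).sum + (l.map g).sum := by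
  induction l with
  | nil => simp
  | cons a l ih => simp [ih]; omega

theorem pv_sum_map_ite {α : Type} (l : List α) (pr : α → Bool) :
    (l.map (fun x => if pr x then (1:Nat) else 0)).sum = l.countP pr := by
  induction l with
  | nil => simp
  | cons a l ih =>
    by_cases h : pr a
    · simp [h, ih]; omega
    · simp [h, ih]

-- double counting: the ordered-pair total equals twice the unordered pair count
theorem pvT_eq (L : List (Int × Int)) :
    (L.map (fun p => (L.count (pvComp p) : Int) - if pvComp p = p then 1 else 0)).sum
      = 2 * (pvPairsB L : Int) := by
  induction L with
  | nil => simp [pvPairsB]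
  | cons p rest ih =>
    have hcnt : ∀ q, (p :: rest).count (pvComp q) = rest.count (pvComp q) + if pvComp q == p then 1 else 0 := by
      intro q
      rw [List.count_cons]
      by_cases h : pvComp q = p
      · simp [h]
      · simp [h, Ne.symm h]
    have hcong : rest.countP (fun q => q == pvComp p) = rest.countP (fun q => pvComp q == p) := by
      apply List.countP_congr
      intro q _
      simp only [beq_iff_eq]
      constructor
      · intro h; subst h; exact pvComp_invol p
      · intro h; rw [← h, pvComp_invol]
    simp only [List.map_cons, List.sum_cons, pvPairsB]
    rw [hcnt p]
    have hsplit : (rest.map (fun q => ((p :: rest).count (pvComp q) : Int) - if pvComp q = q then 1 else 0)).sum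
        = (rest.map (fun q => ((rest.count (pvComp q) : Int) - if pvComp q = q then 1 else 0) + (if pvComp q == p then 1 else 0))).sum := by
      apply congrArg
      apply List.map_congr_left
      intro q _
      rw [hcnt q]
      push_cast
      ring
    rw [hsplit, show (fun q => ((rest.count (pvComp q) : Int) - if pvComp q = q then 1 else 0) + (if pvComp q == p then 1 else 0)) = (fun q => ((rest.count (pvComp q) : Int) - if pvComp q = q then 1 else 0) + (fun q => if pvComp q == p then (1:Int) else 0) q) from rfl]
    rw [PySem.List.sum_map_add_int, ih, PySem.List.sum_map_ite_one_zero]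
    have hc : rest.count (pvComp p) = rest.countP (fun q => pvComp q == p) := by
      rw [List.count_eq_countP, hcong]
    rw [hc]
    simp only [beq_iff_eq]
    push_cast
    split_ifs <;> ring

theorem pv_sum_single (S : List (Int × Int)) (p : Int × Int) (z : Int)
    (hnd : S.Nodup) (hp : p ∈ S) :
    (S.map (fun k => if k = p then z else 0)).sum = z := by
  induction S with
  | nil => cases hp
  | cons s S' ih =>
    rcases List.mem_cons.mp hp with h | h
    · subst h
      have hnot : p ∉ S' := (List.nodup_cons.mp hnd).1
      have hz : (S'.map (fun k => if k = p then z else 0)).sum = 0 := by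
        apply List.sum_eq_zero
        intro x hx
        rcases List.mem_map.mp hx with ⟨k, hk, rfl⟩
        have : k ≠ p := fun e => hnot (e ▸ hk)
        simp [this]
      simp [hz]
    · have hne : s ≠ p := by
        intro e; exact (List.nodup_cons.mp hnd).1 (e ▸ h)
      simp [hne, ih (List.nodup_cons.mp hnd).2 h]

-- grouping: summing count·g over a nodup superset of L's elements sums g over L
theorem pvGroup (L S : List (Int × Int)) (g : Int × Int → Int)
    (hnd : S.Nodup) (hsub : ∀ p ∈ L, p ∈ S) :
    (S.map (fun k => (L.count k : Int) * g k)).sum = (L.map g).sum := by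
  induction L with
  | nil => simp
  | cons p rest ih =>
    have hsplit : (S.map (fun k => ((p :: rest).count k : Int) * g k)).sum
        = (S.map (fun k => (rest.count k : Int) * g k + (fun k => if k = p then g p else 0) k)).sum := by
      apply congrArg
      apply List.map_congr_left
      intro k _
      rw [List.count_cons]
      by_cases h : k = p
      · subst h; simp; ring
      · have h' : (p == k) = false := by
          simp only [beq_eq_false_iff_ne]; exact fun e => h e.symm
        simp [h, h']
    rw [hsplit, PySem.List.sum_map_add_int, ih (fun q hq => hsub q (List.mem_cons_of_mem p hq)),
        pv_sum_single S p (g p) hnd (hsub p (List.mem_cons_self))]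
    simp [add_comm]

-- A's loop invariant, started from a counter of `seen`
theorem pvA_loop (L : List (Int × Int)) (seen : List (Int × Int)) (a : Int) :
    (L.foldl pvStepA (PySem.Dict.counter seen, a)).2
      = a + (((L.map (fun q => seen.count (pvComp q))).sum + pvPairsB L : Nat) : Int) := by
  induction L generalizing seen a with
  | nil => simp [pvPairsB]
  | cons p rest ih =>
    have hstep : pvStepA (PySem.Dict.counter seen, a) p
        = (PySem.Dict.counter (seen ++ [p]), a + (seen.count (pvComp p) : Int)) := by
      unfold pvStepA
      apply Prod.ext
      · rw [PySem.Dict.counter_append_singleton]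
        simp [PySem.Dict.modify]
      · rw [PySem.Dict.contains_counter, PySem.Dict.getD_counter]
        by_cases h : pvComp p ∈ seen
        · simp [h]
        · simp [h, List.count_eq_zero.mpr h]
    rw [List.foldl_cons, hstep, ih]
    have hcnts : ∀ q, (seen ++ [p]).count (pvComp q)
        = seen.count (pvComp q) + if pvComp q == p then 1 else 0 := by
      intro q
      rw [List.count_append]
      congr 1
      by_cases h : pvComp q = p
      · simp [h]
      · simp [h, Ne.symm h]
    have hmap : (rest.map (fun q => (seen ++ [p]).count (pvComp q))).sum
        = (rest.map (fun q => seen.count (pvComp q))).sum + rest.countP (fun q => pvComp q == p) := by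
      calc (rest.map (fun q => (seen ++ [p]).count (pvComp q))).sum
          = (rest.map (fun q => seen.count (pvComp q) + (fun q => if pvComp q == p then 1 else 0) q)).sum := by
            apply congrArg; apply List.map_congr_left; intro q _; exact hcnts q
        _ = _ := by rw [pv_sum_map_add, pv_sum_map_ite]
    rw [hmap]
    simp only [pvPairsB, List.map_cons, List.sum_cons]
    push_cast
    ring

-- Port A's fold over indices is the pvStepA fold over the reduced fractions
theorem pvA_fold (n : Int) (numerator denominator : List Int)
    (h1 : n ≤ numerator.length) (h2 : n ≤ denominator.length) :
    countFractions n numerator denominator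
      = ((pvReds n numerator denominator).foldl pvStepA (PySem.Dict.empty, 0)).2 := by
  unfold countFractions pvReds
  rw [List.foldl_map]
  congr 1
  apply PySem.List.foldl_congr_mem
  intro st i hi
  obtain ⟨hi0, hin⟩ := PySem.List.mem_pyRange_one.mp hi
  have hxl : i < (numerator.length : Int) := lt_of_lt_of_le hin h1
  have hyl : i < (denominator.length : Int) := lt_of_lt_of_le hin h2
  rw [PySem.List.pyGet?_eq_some_getElem numerator hi0 hxl,
      PySem.List.pyGet?_eq_some_getElem denominator hi0 hyl,
      PySem.List.pyGetD_eq_getElem numerator 0 hi0 hxl,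
      PySem.List.pyGetD_eq_getElem denominator 0 hi0 hyl]
  rfl

-- Port B is the halved sum over the counter's items of the reduced fractions
theorem pvB_fold (n : Int) (numerator denominator : List Int)
    (h1 : n ≤ numerator.length) (h2 : n ≤ denominator.length) :
    countFractions_alt n numerator denominator
      = PySem.Int.floordiv
          (((PySem.Dict.counter (pvReds n numerator denominator)).items.map
            (fun kc =>
              if (kc.1.2 - kc.1.1, kc.1.2) = kc.1 then kc.2 * (kc.2 - 1)
              else kc.2 * ((PySem.Dict.counter (pvReds n numerator denominator)).getD (kc.1.2 - kc.1.1, kc.1.2) 0))).sum)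
          2 := by
  unfold countFractions_alt
  have hcnt : (PySem.List.pyRange 0 n 1).foldl
      (fun d i =>
        match PySem.List.pyGet? numerator i with
        | none => d
        | some x0 =>
          match PySem.List.pyGet? denominator i with
          | none => d
          | some y0 =>
            let g : Int := Int.gcd x0 y0
            let p := (PySem.Int.floordiv x0 g, PySem.Int.floordiv y0 g)
            d.insert p (d.getD p 0 + 1))
      (PySem.Dict.empty : PySem.Dict (Int × Int) Int) = PySem.Dict.counter (pvReds n numerator denominator) := by
    rw [← PySem.Dict.foldl_insert_getD_add_one_eq_counter]
    unfold pvReds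
    rw [List.foldl_map]
    apply PySem.List.foldl_congr_mem
    intro d i hi
    obtain ⟨hi0, hin⟩ := PySem.List.mem_pyRange_one.mp hi
    have hxl : i < (numerator.length : Int) := lt_of_lt_of_le hin h1
    have hyl : i < (denominator.length : Int) := lt_of_lt_of_le hin h2
    rw [PySem.List.pyGet?_eq_some_getElem numerator hi0 hxl,
        PySem.List.pyGet?_eq_some_getElem denominator hi0 hyl,
        PySem.List.pyGetD_eq_getElem numerator 0 hi0 hxl,
        PySem.List.pyGetD_eq_getElem denominator 0 hi0 hyl]
    rfl
  simp only [hcnt]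
  congr 1
  rw [PySem.List.foldl_congr_mem _ _
      (fun t kc =>
        t + (if (kc.1.2 - kc.1.1, kc.1.2) = kc.1 then kc.2 * (kc.2 - 1)
        else kc.2 * ((PySem.Dict.counter (pvReds n numerator denominator)).getD (kc.1.2 - kc.1.1, kc.1.2) 0)))
      0 (by intro t kc _; by_cases h : (kc.1.2 - kc.1.1, kc.1.2) = kc.1 <;> simp [h])]
  rw [PySem.List.foldl_add]
  simp

-- both ports compute the unordered pair count
theorem pvMain (n : Int) (numerator denominator : List Int)
    (h1 : n ≤ numerator.length) (h2 : n ≤ denominator.length) :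
    countFractions n numerator denominator = countFractions_alt n numerator denominator := by
  set L := pvReds n numerator denominator with hL
  have hA : countFractions n numerator denominator = (pvPairsB L : Int) := by
    rw [pvA_fold n numerator denominator h1 h2]
    have : (PySem.Dict.empty : PySem.Dict (Int × Int) Int) = PySem.Dict.counter [] := rfl
    rw [this, pvA_loop L [] 0]
    simp
  have hB : countFractions_alt n numerator denominator = (pvPairsB L : Int) := by
    rw [pvB_fold n numerator denominator h1 h2]
    rw [PySem.Dict.items_counter]
    rw [List.map_map]
    have hpt : ((PySem.Set.ofList L : List (Int × Int)).map
        ((fun kc : (Int × Int) × Int =>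
          if (kc.1.2 - kc.1.1, kc.1.2) = kc.1 then kc.2 * (kc.2 - 1)
          else kc.2 * ((PySem.Dict.counter L).getD (kc.1.2 - kc.1.1, kc.1.2) 0))
          ∘ (fun k => (k, (L.count k : Int))))).sum
        = ((PySem.Set.ofList L : List (Int × Int)).map
          (fun k => (L.count k : Int) *
            ((L.count (pvComp k) : Int) - if pvComp k = k then 1 else 0))).sum := by
      apply congrArg
      apply List.map_congr_left
      intro k _
      simp only [Function.comp_apply, PySem.Dict.getD_counter]
      show (if pvComp k = k then (L.count k : Int) * ((L.count k : Int) - 1)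
            else (L.count k : Int) * (L.count (pvComp k) : Int)) = _
      split_ifs with h
      · rw [h]
      · ring
    rw [hpt, pvGroup L (PySem.Set.ofList L) _ (PySem.Set.nodup_ofList L)
        (fun p hp => (PySem.Set.mem_ofList L p).mpr hp)]
    rw [pvT_eq L]
    rw [PySem.Int.floordiv_eq_ediv_of_pos (by norm_num : (0:Int) < 2)]
    omega
  rw [hA, hB]

-- ===== VERDICT (by name: the statement is the Claim_ definition above) =====
theorem countFractions_spec : Claim_equal_countFractions := by
  intro n numerator denominator _ hpre
  unfold Spec_countFractions
  exact pvMain n numerator denominator hpre.1 hpre.2.1
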